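-- pv_equiv track=rewrite | github.com/talvasconcelos/hermitcrab | hermitcrab/agent/skills.py | _build_selection_query
-- ===== SOURCE A (Python) =====
-- def _build_selection_query(
--
--     current_message: str,
--     history: list[dict[str, str]],
-- ) -> str:
--     parts = [current_message]
--     user_turns: list[str] = []
--     for msg in reversed(history):
--         if msg.get("role") != "user":
--             continue
--         content = (msg.get("content") or "").strip()
--         if content:
--             user_turns.append(content)
--         if len(user_turns) >= 2:
--             break
--     parts.extend(reversed(user_turns))
--     return " ".join(parts)
-- ===== SOURCE B (Python) =====
-- def _build_selection_query(
--     current_message: str,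
--     history: list[dict[str, str]],
-- ) -> str:
--     user_turns = [
--         c
--         for c in ((m.get("content") or "").strip() for m in history if m.get("role") == "user")
--         if c
--     ]
--     return " ".join([current_message] + user_turns[-2:])
-- ===== Notes on version B (the rewrite author's own statement) =====
-- stated objective: simpler
-- what changed: B replaces A's reverse iteration with early exit, manual accumulation and re-reversal by a single forward comprehension collecting all non-empty user contents plus a [-2:] tail slice.
import Mathlib
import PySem

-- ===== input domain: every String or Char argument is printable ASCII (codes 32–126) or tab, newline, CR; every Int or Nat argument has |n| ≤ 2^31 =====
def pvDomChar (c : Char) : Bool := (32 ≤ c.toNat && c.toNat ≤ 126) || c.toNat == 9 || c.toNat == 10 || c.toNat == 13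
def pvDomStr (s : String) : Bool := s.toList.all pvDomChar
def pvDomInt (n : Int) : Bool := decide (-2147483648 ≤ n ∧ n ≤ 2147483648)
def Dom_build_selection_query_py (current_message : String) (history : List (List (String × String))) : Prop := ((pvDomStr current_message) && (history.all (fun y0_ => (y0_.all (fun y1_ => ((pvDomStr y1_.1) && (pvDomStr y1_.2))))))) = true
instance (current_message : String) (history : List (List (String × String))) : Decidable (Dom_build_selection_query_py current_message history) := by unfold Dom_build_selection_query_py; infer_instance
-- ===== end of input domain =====

-- B is simpler: one forward comprehension over history plus a [-2:] tail slice, instead of A's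
-- reverse iteration with early exit, manual accumulation and re-reversal.  Return values only.

-- ===== PORT A =====
-- A's loop over reversed(history): collects stripped non-empty user contents, newest first,
-- breaking as soon as two are held.
def pvALoop : List (List (String × String)) → List String → List String
  | [], user_turns => user_turns
  | msg :: rest, user_turns =>
    if msg.lookup "role" ≠ some "user" then pvALoop rest user_turns
    else
      let content := PySem.Str.strip ((msg.lookup "content").getD "")
      let user_turns' := if content ≠ "" then user_turns ++ [content] else user_turns
      if user_turns'.length ≥ 2 then user_turns' else pvALoop rest user_turns'

def build_selection_query_py (current_message : String) (history : List (List (String × String))) : String :=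
  PySem.Str.join " " ([current_message] ++ (pvALoop history.reverse []).reverse)

-- ===== PORT B =====
-- the generator expression filtered to non-empty strings, as a filterMap
def pvUserTurns (history : List (List (String × String))) : List String :=
  history.filterMap (fun msg =>
    if msg.lookup "role" = some "user" then
      let c := PySem.Str.strip ((msg.lookup "content").getD "")
      if c ≠ "" then some c else none
    else none)

def build_selection_query_py_alt (current_message : String) (history : List (List (String × String))) : String :=
  PySem.Str.join " " ([current_message] ++ PySem.List.slice (pvUserTurns history) (some (-2)) none)

-- ===== PRECONDITION & SPEC =====
def Spec_build_selection_query_py (current_message : String) (history : List (List (String × String))) (out : String) : Prop := out = build_selection_query_py_alt current_message history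
instance (current_message : String) (history : List (List (String × String))) (out : String) : Decidable (Spec_build_selection_query_py current_message history out) := by unfold Spec_build_selection_query_py; infer_instance

-- ===== CLAIM (what is proved, stated in full; the proofs are below) =====
def Claim_equal_build_selection_query_py : Prop := ∀ (current_message : String) (history : List (List (String × String))), Dom_build_selection_query_py current_message history → Spec_build_selection_query_py current_message history (build_selection_query_py current_message history)

-- ===== LEMMAS AND PROOFS =====

-- A's loop collects the first two user turns of the list it walks, in order.
theorem pvALoop_eq_take (m : List (List (String × String))) :
    ∀ acc : List String, acc.length < 2 →
    pvALoop m acc = acc ++ (pvUserTurns m).take (2 - acc.length) := by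
  induction m with
  | nil => intro acc _; simp [pvALoop, pvUserTurns]
  | cons msg rest ih =>
    intro acc hlt
    simp only [pvUserTurns] at ih ⊢
    simp only [List.filterMap_cons]
    by_cases hrole : msg.lookup "role" = some "user"
    · by_cases hce : PySem.Str.strip ((msg.lookup "content").getD "") = ""
      · have h2 : ¬ 2 ≤ acc.length := by omega
        simp [pvALoop, hrole, hce, h2, ih acc hlt]
      · rcases acc with _ | ⟨a, _ | ⟨b, t⟩⟩
        · simp [pvALoop, hrole, hce, ih [PySem.Str.strip ((msg.lookup "content").getD "")] (by simp)]
        · simp [pvALoop, hrole, hce]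
        · simp at hlt
    · simp [pvALoop, hrole, ih acc hlt]

theorem pv_tail_eq (history : List (List (String × String))) :
    (pvALoop history.reverse []).reverse
      = PySem.List.slice (pvUserTurns history) (some (-2)) none := by
  rw [PySem.List.slice_from_neg_ofNat _ 2 (by omega)]
  rw [pvALoop_eq_take history.reverse [] (by simp)]
  have hrev : pvUserTurns history.reverse = (pvUserTurns history).reverse := by
    simp [pvUserTurns, List.filterMap_reverse]
  simp [hrev, List.take_reverse]

-- ===== VERDICT (by name: the statement is the Claim_ definition above) =====
theorem build_selection_query_py_spec : Claim_equal_build_selection_query_py := by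
  intro current_message history _
  unfold Spec_build_selection_query_py build_selection_query_py build_selection_query_py_alt
  rw [pv_tail_eq]
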